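-- pv_equiv track=rewrite | github.com/W-Thurston/Advent-of-Code-Lets-Learn | src/aoc2025/solutions/day04/optimized.py | compute_initial_counts
-- ===== SOURCE A (Python) =====
-- D8: list[tuple[int, int]] = [
--     (-1, -1),
--     (-1, 0),
--     (-1, 1),
--     (0, -1),
--     (0, 1),
--     (1, -1),
--     (1, 0),
--     (1, 1),
-- ]
--
-- def compute_initial_counts(grid: list[list[str]]) -> list[list[int]]:
--     """Precompute adjacency counts for all cells."""
--     h: int = len(grid)
--     w: int = len(grid[0])
--     adj: list[list[int]] = [[0] * w for _ in range(h)]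
--     for r in range(h):
--         for c in range(w):
--             if grid[r][c] == "@":
--                 cnt = 0
--                 for dr, dc in D8:
--                     rr, cc = r + dr, c + dc
--                     if 0 <= rr < h and 0 <= cc < w and grid[rr][cc] == "@":
--                         cnt += 1
--                 adj[r][c] = cnt
--     return adj
-- ===== SOURCE B (Python) =====
-- def compute_initial_counts(grid: list[list[str]]) -> list[list[int]]:
--     """Precompute adjacency counts via a separable 3x3 sum (row pass then column pass)."""
--     h: int = len(grid)
--     w: int = len(grid[0])
--     m = [[1 if grid[r][c] == "@" else 0 for c in range(w)] for r in range(h)]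
--     hs = [
--         [(row[c - 1] if c > 0 else 0) + row[c] + (row[c + 1] if c + 1 < w else 0)
--          for c in range(w)]
--         for row in m
--     ]
--     return [
--         [((hs[r - 1][c] if r > 0 else 0) + hs[r][c] + (hs[r + 1][c] if r + 1 < h else 0) - 1)
--          if m[r][c] else 0
--          for c in range(w)]
--         for r in range(h)
--     ]
-- ===== Notes on version B (the rewrite author's own statement) =====
-- stated objective: alternative
-- what changed: B replaces the per-'@'-cell scan over the 8-direction offset list by a separable 3x3 box sum: one horizontal sliding-sum pass over a 0/1 grid, then a vertical pass, subtracting the centre cell.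
import Mathlib
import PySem

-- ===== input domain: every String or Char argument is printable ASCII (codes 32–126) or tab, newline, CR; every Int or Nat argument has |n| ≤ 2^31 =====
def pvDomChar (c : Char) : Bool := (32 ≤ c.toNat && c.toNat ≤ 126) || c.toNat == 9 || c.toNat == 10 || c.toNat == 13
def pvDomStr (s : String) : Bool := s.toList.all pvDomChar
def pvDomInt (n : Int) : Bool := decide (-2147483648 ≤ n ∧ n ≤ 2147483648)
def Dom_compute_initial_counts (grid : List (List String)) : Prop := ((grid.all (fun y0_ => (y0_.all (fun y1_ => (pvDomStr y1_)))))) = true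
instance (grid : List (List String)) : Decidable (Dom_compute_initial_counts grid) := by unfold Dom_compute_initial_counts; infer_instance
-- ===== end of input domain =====

-- B computes the same 8-neighbour '@' counts by a separable 3x3 box sum (horizontal pass
-- then vertical pass over a 0/1 grid) instead of scanning the 8-direction list per cell.


-- ===== PORT A =====
def D8port : List (Int × Int) :=
  [(-1, -1), (-1, 0), (-1, 1), (0, -1), (0, 1), (1, -1), (1, 0), (1, 1)]

-- the innermost loop of A (`cnt` over D8); indices rr, cc are converted with .toNat only
-- after 0 ≤ rr / 0 ≤ cc has been checked, so this is exact Python indexing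
def pvCntA (grid : List (List String)) (h w : Nat) (r c : Nat) : Int :=
  D8port.foldl (fun cnt d =>
    let rr : Int := (r : Int) + d.1
    let cc : Int := (c : Int) + d.2
    if 0 ≤ rr ∧ rr < (h : Int) ∧ 0 ≤ cc ∧ cc < (w : Int) ∧
        (grid.getD rr.toNat []).getD cc.toNat "" = "@" then cnt + 1 else cnt) 0

def compute_initial_counts (grid : List (List String)) : List (List Int) :=
  let h := grid.length
  let w := (grid.getD 0 []).length   -- grid[0]; Pre_ excludes the empty grid (Python IndexError)
  let adj : List (List Int) := (List.range h).map (fun _ => List.replicate w (0 : Int))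
  (List.range h).foldl (fun adj r =>
    (List.range w).foldl (fun adj c =>
      if (grid.getD r []).getD c "" = "@" then
        adj.set r ((adj.getD r []).set c (pvCntA grid h w r c))
      else adj) adj) adj

-- ===== PORT B =====
def compute_initial_counts_alt (grid : List (List String)) : List (List Int) :=
  let h := grid.length
  let w := (grid.getD 0 []).length
  let m : List (List Int) := (List.range h).map (fun r =>
    (List.range w).map (fun c => if (grid.getD r []).getD c "" = "@" then 1 else 0))
  let hs : List (List Int) := m.map (fun row =>
    (List.range w).map (fun c =>
      (if 0 < c then row.getD (c - 1) 0 else 0) + row.getD c 0 +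
        (if c + 1 < w then row.getD (c + 1) 0 else 0)))
  (List.range h).map (fun r =>
    (List.range w).map (fun c =>
      if (m.getD r []).getD c 0 ≠ 0 then
        (if 0 < r then (hs.getD (r - 1) []).getD c 0 else 0) + (hs.getD r []).getD c 0 +
          (if r + 1 < h then (hs.getD (r + 1) []).getD c 0 else 0) - 1
      else 0))

-- ===== PRECONDITION & SPEC =====
-- Pre_ excludes exactly the inputs on which the Python A raises IndexError:
-- the empty grid (grid[0]) and grids with a row shorter than len(grid[0]).
def Pre_compute_initial_counts (grid : List (List String)) : Prop :=
  grid ≠ [] ∧ ∀ row ∈ grid, (grid.getD 0 []).length ≤ row.length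
instance (grid : List (List String)) : Decidable (Pre_compute_initial_counts grid) := by
  unfold Pre_compute_initial_counts; infer_instance

def pvWitness_compute_initial_counts : List (List String) := [["@", "."], [".", "@"]]

def Spec_compute_initial_counts (grid : List (List String)) (out : List (List Int)) : Prop := out = compute_initial_counts_alt grid
instance (grid : List (List String)) (out : List (List Int)) : Decidable (Spec_compute_initial_counts grid out) := by unfold Spec_compute_initial_counts; infer_instance

-- ===== CLAIM (what is proved, stated in full; the proofs are below) =====
def Claim_equal_compute_initial_counts : Prop := ∀ (grid : List (List String)), Dom_compute_initial_counts grid → Pre_compute_initial_counts grid → Spec_compute_initial_counts grid (compute_initial_counts grid)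

-- ===== LEMMAS AND PROOFS =====

-- cell lookup and indicator helpers (proof-only)
def pvCell (grid : List (List String)) (r c : Nat) : String := (grid.getD r []).getD c ""

def pvNu (grid : List (List String)) (h w : Nat) (rr cc : Int) : Int :=
  if 0 ≤ rr ∧ rr < (h : Int) ∧ 0 ≤ cc ∧ cc < (w : Int) ∧
      (grid.getD rr.toNat []).getD cc.toNat "" = "@" then 1 else 0

def pvMu (grid : List (List String)) (r c : Nat) : Int :=
  if pvCell grid r c = "@" then 1 else 0

-- A's inner loop body over the whole adj matrix
def pvInner (grid : List (List String)) (h w : Nat) (r : Nat)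
    (adj : List (List Int)) (c : Nat) : List (List Int) :=
  if (grid.getD r []).getD c "" = "@" then
    adj.set r ((adj.getD r []).set c (pvCntA grid h w r c))
  else adj

lemma pvInner_length (grid : List (List String)) (h w r : Nat) :
    ∀ (l : List Nat) (adj : List (List Int)),
      (l.foldl (pvInner grid h w r) adj).length = adj.length := by
  intro l
  induction l with
  | nil => intro adj; rfl
  | cons x xs ih =>
    intro adj
    simp only [List.foldl_cons, ih]
    unfold pvInner
    split <;> simp

lemma pvInner_other (grid : List (List String)) (h w r : Nat) :
    ∀ (l : List Nat) (adj : List (List Int)) (r' : Nat), r' ≠ r →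
      (l.foldl (pvInner grid h w r) adj).getD r' [] = adj.getD r' [] := by
  intro l
  induction l with
  | nil => intro adj r' _; rfl
  | cons x xs ih =>
    intro adj r' hne
    simp only [List.foldl_cons, ih _ r' hne]
    unfold pvInner
    split
    · simp [List.getD_eq_getElem?_getD, (Ne.symm hne)]
    · rfl

lemma pvInner_row_len (grid : List (List String)) (h w r : Nat) :
    ∀ (l : List Nat) (adj : List (List Int)),
      ((l.foldl (pvInner grid h w r) adj).getD r []).length = (adj.getD r []).length := by
  intro l
  induction l with
  | nil => intro adj; rfl
  | cons x xs ih =>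
    intro adj
    simp only [List.foldl_cons, ih]
    unfold pvInner
    split
    · by_cases hr : r < adj.length
      · simp [List.getD_eq_getElem?_getD, hr]
      · simp [List.getD_eq_getElem?_getD, hr]
    · rfl

lemma pv_getD_set {α : Type} (l : List α) (i j : Nat) (a d : α) :
    (l.set i a).getD j d = if i = j ∧ i < l.length then a else l.getD j d := by
  simp only [List.getD_eq_getElem?_getD, List.getElem?_set]
  by_cases h1 : i = j
  · subst h1
    by_cases h2 : i < l.length <;> simp [h2]
  · simp [h1]

lemma pvInner_entry (grid : List (List String)) (h w r : Nat) :
    ∀ (n : Nat) (adj : List (List Int)) (c : Nat),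
      (((List.range n).foldl (pvInner grid h w r) adj).getD r []).getD c 0 =
        if c < n ∧ c < (adj.getD r []).length ∧ pvCell grid r c = "@" then
          pvCntA grid h w r c
        else (adj.getD r []).getD c 0 := by
  intro n
  induction n with
  | zero => intro adj c; simp
  | succ n ih =>
    intro adj c
    rw [List.range_succ, List.foldl_append]
    simp only [List.foldl_cons, List.foldl_nil]
    set An := (List.range n).foldl (pvInner grid h w r) adj with hAn
    have hlen : An.length = adj.length := pvInner_length grid h w r _ adj
    have hrowlen : (An.getD r []).length = (adj.getD r []).length :=
      pvInner_row_len grid h w r _ adj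
    have key : (((pvInner grid h w r An n)).getD r []).getD c 0 =
        if c = n ∧ c < (adj.getD r []).length ∧ pvCell grid r n = "@" then
          pvCntA grid h w r n
        else (An.getD r []).getD c 0 := by
      unfold pvInner
      by_cases hat : (grid.getD r []).getD n "" = "@"
      · rw [if_pos hat, pv_getD_set]
        by_cases hr : r < An.length
        · rw [if_pos ⟨rfl, hr⟩, pv_getD_set]
          by_cases hcn : c = n
          · subst hcn
            by_cases hc : c < (An.getD r []).length
            · rw [if_pos ⟨rfl, hc⟩,
                if_pos ⟨rfl, hrowlen ▸ hc, by simpa [pvCell] using hat⟩]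
            · rw [if_neg (by tauto), if_neg (by rw [← hrowlen]; tauto)]
          · rw [if_neg (by tauto), if_neg (by tauto)]
        · -- r out of range: both rows are []
          have hradj : ¬ r < adj.length := by rw [← hlen]; exact hr
          have h0 : (adj.getD r []).length = 0 := by
            simp [List.getD_eq_getElem?_getD,
              List.getElem?_eq_none (by omega : adj.length ≤ r)]
          rw [if_neg (by tauto), if_neg (by omega)]
      · rw [if_neg hat, if_neg (by simp [pvCell]; tauto)]
    rw [key]
    by_cases hcn : c = n
    · subst hcn
      rw [ih adj c]
      by_cases hc : c < (adj.getD r []).length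
      · by_cases hat : pvCell grid r c = "@"
        · rw [if_pos ⟨rfl, hc, hat⟩, if_pos ⟨Nat.lt_succ_self c, hc, hat⟩]
        · rw [if_neg (by tauto), if_neg (by tauto), if_neg (by tauto)]
      · rw [if_neg (by tauto), if_neg (by tauto), if_neg (by tauto)]
    · rw [if_neg (by tauto), ih adj c]
      have hiff : (c < n + 1 ∧ c ≠ n) ↔ c < n := by omega
      by_cases hcnn : c < n
      · have : c < n + 1 := by omega
        simp only [hcnn, this, true_and]
      · have : ¬ c < n + 1 := by omega
        simp only [hcnn, this, false_and, if_false]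

-- outer loop
def pvOuter (grid : List (List String)) (h w : Nat)
    (adj : List (List Int)) (r : Nat) : List (List Int) :=
  (List.range w).foldl (pvInner grid h w r) adj

lemma pvOuter_length (grid : List (List String)) (h w : Nat) :
    ∀ (l : List Nat) (adj : List (List Int)),
      (l.foldl (pvOuter grid h w) adj).length = adj.length := by
  intro l
  induction l with
  | nil => intro adj; rfl
  | cons x xs ih =>
    intro adj
    simp only [List.foldl_cons, ih]
    exact pvInner_length grid h w x _ adj

lemma pvOuter_row_len (grid : List (List String)) (h w : Nat) :
    ∀ (l : List Nat) (adj : List (List Int)) (r : Nat),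
      ((l.foldl (pvOuter grid h w) adj).getD r []).length = (adj.getD r []).length := by
  intro l
  induction l with
  | nil => intro adj r; rfl
  | cons x xs ih =>
    intro adj r
    simp only [List.foldl_cons, ih]
    unfold pvOuter
    by_cases hxr : r = x
    · subst hxr; exact pvInner_row_len grid h w r _ adj
    · rw [pvInner_other grid h w x _ adj r hxr]

lemma pvOuter_entry (grid : List (List String)) (h w : Nat) :
    ∀ (n : Nat) (adj : List (List Int)) (r c : Nat),
      ((((List.range n).foldl (pvOuter grid h w) adj)).getD r []).getD c 0 =
        if r < n ∧ c < w ∧ c < (adj.getD r []).length ∧ pvCell grid r c = "@" then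
          pvCntA grid h w r c
        else (adj.getD r []).getD c 0 := by
  intro n
  induction n with
  | zero => intro adj r c; simp
  | succ n ih =>
    intro adj r c
    rw [List.range_succ, List.foldl_append]
    simp only [List.foldl_cons, List.foldl_nil]
    set An := (List.range n).foldl (pvOuter grid h w) adj with hAn
    have hrowlen : (An.getD r []).length = (adj.getD r []).length :=
      pvOuter_row_len grid h w _ adj r
    by_cases hrn : r = n
    · subst hrn
      have hAnentry : (An.getD r []).getD c 0 = (adj.getD r []).getD c 0 := by
        rw [ih adj r c, if_neg (by omega)]
      unfold pvOuter
      rw [pvInner_entry grid h w r w An c, hrowlen, hAnentry]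
      by_cases hcond : c < w ∧ c < (adj.getD r []).length ∧ pvCell grid r c = "@"
      · rw [if_pos hcond, if_pos ⟨Nat.lt_succ_self r, hcond⟩]
      · rw [if_neg hcond, if_neg (by tauto)]
    · unfold pvOuter
      rw [pvInner_other grid h w n _ An r hrn, ih adj r c]
      by_cases hr : r < n
      · have hr1 : r < n + 1 := by omega
        simp only [hr, hr1, true_and]
      · have hr1 : ¬ (r < n + 1) := by omega
        simp only [hr, hr1, false_and, if_false]

-- initial matrix entries
lemma pvInit_row (_grid : List (List String)) (h w : Nat) (r : Nat) (hr : r < h) :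
    (((List.range h).map (fun _ => List.replicate w (0 : Int))).getD r []) =
      List.replicate w (0 : Int) := by
  rw [List.getD_eq_getElem?_getD, List.getElem?_eq_getElem (by simpa using hr)]
  simp

-- evaluating A pointwise
lemma pvA_entry (grid : List (List String)) (r c : Nat)
    (hr : r < grid.length) (hc : c < (grid.getD 0 []).length) :
    ((compute_initial_counts grid).getD r []).getD c 0 =
      if pvCell grid r c = "@" then
        pvCntA grid grid.length (grid.getD 0 []).length r c
      else 0 := by
  unfold compute_initial_counts
  simp only
  rw [show (fun (adj : List (List Int)) (r : Nat) =>
        (List.range (grid.getD 0 []).length).foldl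
          (fun adj c =>
            if (grid.getD r []).getD c "" = "@" then
              adj.set r ((adj.getD r []).set c
                (pvCntA grid grid.length (grid.getD 0 []).length r c))
            else adj) adj) =
      pvOuter grid grid.length (grid.getD 0 []).length from rfl]
  rw [pvOuter_entry]
  rw [pvInit_row grid grid.length (grid.getD 0 []).length r hr]
  simp only [List.getD_eq_getElem?_getD] at hc
  simp [hr, hc, pvCell]

lemma pvA_length (grid : List (List String)) :
    (compute_initial_counts grid).length = grid.length := by
  unfold compute_initial_counts
  simp only
  rw [show (fun (adj : List (List Int)) (r : Nat) =>
        (List.range (grid.getD 0 []).length).foldl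
          (fun adj c =>
            if (grid.getD r []).getD c "" = "@" then
              adj.set r ((adj.getD r []).set c
                (pvCntA grid grid.length (grid.getD 0 []).length r c))
            else adj) adj) =
      pvOuter grid grid.length (grid.getD 0 []).length from rfl]
  rw [pvOuter_length]
  simp

lemma pvA_row_len (grid : List (List String)) (r : Nat) (hr : r < grid.length) :
    ((compute_initial_counts grid).getD r []).length = (grid.getD 0 []).length := by
  unfold compute_initial_counts
  simp only
  rw [show (fun (adj : List (List Int)) (r : Nat) =>
        (List.range (grid.getD 0 []).length).foldl
          (fun adj c =>
            if (grid.getD r []).getD c "" = "@" then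
              adj.set r ((adj.getD r []).set c
                (pvCntA grid grid.length (grid.getD 0 []).length r c))
            else adj) adj) =
      pvOuter grid grid.length (grid.getD 0 []).length from rfl]
  rw [pvOuter_row_len, pvInit_row grid grid.length (grid.getD 0 []).length r hr]
  simp

-- ν in terms of μ, for the nine offsets
lemma pvNu_eval (grid : List (List String)) (h w : Nat) (rr cc : Int) :
    pvNu grid h w rr cc =
      if 0 ≤ rr ∧ rr < (h : Int) ∧ 0 ≤ cc ∧ cc < (w : Int) then
        pvMu grid rr.toNat cc.toNat else 0 := by
  unfold pvNu pvMu pvCell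
  by_cases hb : 0 ≤ rr ∧ rr < (h : Int) ∧ 0 ≤ cc ∧ cc < (w : Int)
  · obtain ⟨h1, h2, h3, h4⟩ := hb
    by_cases hat : (grid.getD rr.toNat []).getD cc.toNat "" = "@"
    · rw [if_pos ⟨h1, h2, h3, h4, hat⟩, if_pos ⟨h1, h2, h3, h4⟩, if_pos hat]
    · rw [if_neg (by tauto), if_pos ⟨h1, h2, h3, h4⟩, if_neg hat]
  · rw [if_neg (by tauto), if_neg hb]

lemma pv_if_step (P : Prop) [Decidable P] (x : Int) :
    (if P then x + 1 else x) = x + (if P then (1 : Int) else 0) := by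
  split <;> omega

-- the count over D8 as a sum of eight ν values
lemma pvCntA_eq_sum (grid : List (List String)) (h w : Nat) (r c : Nat) :
    pvCntA grid h w r c =
      pvNu grid h w ((r : Int) + -1) ((c : Int) + -1) +
      pvNu grid h w ((r : Int) + -1) ((c : Int) + 0) +
      pvNu grid h w ((r : Int) + -1) ((c : Int) + 1) +
      pvNu grid h w ((r : Int) + 0) ((c : Int) + -1) +
      pvNu grid h w ((r : Int) + 0) ((c : Int) + 1) +
      pvNu grid h w ((r : Int) + 1) ((c : Int) + -1) +
      pvNu grid h w ((r : Int) + 1) ((c : Int) + 0) +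
      pvNu grid h w ((r : Int) + 1) ((c : Int) + 1) := by
  unfold pvCntA D8port
  simp only [List.foldl_cons, List.foldl_nil, pv_if_step]
  unfold pvNu
  norm_num

-- B-side mirror definitions (proof-only)
def pvM (grid : List (List String)) : List (List Int) :=
  (List.range grid.length).map (fun r =>
    (List.range (grid.getD 0 []).length).map (fun c =>
      if (grid.getD r []).getD c "" = "@" then 1 else 0))

def pvHs (grid : List (List String)) : List (List Int) :=
  (pvM grid).map (fun row =>
    (List.range (grid.getD 0 []).length).map (fun c =>
      (if 0 < c then row.getD (c - 1) 0 else 0) + row.getD c 0 +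
        (if c + 1 < (grid.getD 0 []).length then row.getD (c + 1) 0 else 0)))

lemma pvAlt_eq (grid : List (List String)) :
    compute_initial_counts_alt grid =
      (List.range grid.length).map (fun r =>
        (List.range (grid.getD 0 []).length).map (fun c =>
          if ((pvM grid).getD r []).getD c 0 ≠ 0 then
            (if 0 < r then ((pvHs grid).getD (r - 1) []).getD c 0 else 0) +
              ((pvHs grid).getD r []).getD c 0 +
              (if r + 1 < grid.length then ((pvHs grid).getD (r + 1) []).getD c 0 else 0) - 1
          else 0)) := rfl

lemma pv_get_eq_getD {α : Type} (l : List α) (r : Nat) (d : α) (h : r < l.length) :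
    l[r] = l.getD r d := by
  rw [List.getD_eq_getElem?_getD, List.getElem?_eq_getElem h]
  rfl

lemma pvM_row (grid : List (List String)) (r : Nat) (hr : r < grid.length) :
    (pvM grid).getD r [] =
      (List.range (grid.getD 0 []).length).map (fun c =>
        if (grid.getD r []).getD c "" = "@" then 1 else 0) := by
  unfold pvM
  rw [← pv_get_eq_getD _ r [] (by simpa using hr)]
  simp

lemma pvM_entry (grid : List (List String)) (r c : Nat)
    (hr : r < grid.length) (hc : c < (grid.getD 0 []).length) :
    ((pvM grid).getD r []).getD c 0 = pvMu grid r c := by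
  rw [pvM_row grid r hr, ← pv_get_eq_getD _ c 0 (by simpa using hc)]
  simp [pvMu, pvCell]

lemma pvHs_entry (grid : List (List String)) (r c : Nat)
    (hr : r < grid.length) (hc : c < (grid.getD 0 []).length) :
    ((pvHs grid).getD r []).getD c 0 =
      (if 0 < c then pvMu grid r (c - 1) else 0) + pvMu grid r c +
        (if c + 1 < (grid.getD 0 []).length then pvMu grid r (c + 1) else 0) := by
  have hm : r < (pvM grid).length := by simp [pvM]; omega
  have hrow : ∀ c', c' < (grid.getD 0 []).length →
      ((pvM grid).getD r []).getD c' 0 = pvMu grid r c' := fun c' hc' =>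
    pvM_entry grid r c' hr hc'
  unfold pvHs
  rw [← pv_get_eq_getD _ r [] (by simpa using hm), List.getElem_map,
    ← pv_get_eq_getD _ c 0 (by simpa using hc), List.getElem_map, List.getElem_range,
    pv_get_eq_getD _ r [] hm]
  by_cases h0 : 0 < c
  · by_cases h1 : c + 1 < (grid.getD 0 []).length
    · rw [if_pos h0, if_pos h0, if_pos h1, if_pos h1,
        hrow _ (by omega), hrow _ hc, hrow _ (by omega)]
    · rw [if_pos h0, if_pos h0, if_neg h1, if_neg h1, hrow _ (by omega), hrow _ hc]
  · by_cases h1 : c + 1 < (grid.getD 0 []).length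
    · rw [if_neg h0, if_neg h0, if_pos h1, if_pos h1, hrow _ hc, hrow _ (by omega)]
    · rw [if_neg h0, if_neg h0, if_neg h1, if_neg h1, hrow _ hc]

lemma pvNu_toMu (grid : List (List String)) (h w : Nat) (rr cc : Int)
    (h1 : 0 ≤ rr) (h2 : rr < (h : Int)) (h3 : 0 ≤ cc) (h4 : cc < (w : Int)) :
    pvNu grid h w rr cc = pvMu grid rr.toNat cc.toNat := by
  rw [pvNu_eval, if_pos ⟨h1, h2, h3, h4⟩]

lemma pvNu_zero (grid : List (List String)) (h w : Nat) (rr cc : Int)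
    (hneg : ¬ (0 ≤ rr ∧ rr < (h : Int) ∧ 0 ≤ cc ∧ cc < (w : Int))) :
    pvNu grid h w rr cc = 0 := by
  rw [pvNu_eval, if_neg hneg]

-- a horizontal triple of ν values equals one hs entry (given the row is in range)
lemma pvRow3 (grid : List (List String)) (h w : Nat) (r' c : Nat)
    (hr : r' < h) (hc : c < w) :
    pvNu grid h w (r' : Int) ((c : Int) + -1) + pvNu grid h w (r' : Int) ((c : Int) + 0) +
      pvNu grid h w (r' : Int) ((c : Int) + 1) =
    (if 0 < c then pvMu grid r' (c - 1) else 0) + pvMu grid r' c +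
      (if c + 1 < w then pvMu grid r' (c + 1) else 0) := by
  have t1 : pvNu grid h w (r' : Int) ((c : Int) + -1) =
      (if 0 < c then pvMu grid r' (c - 1) else 0) := by
    by_cases h0 : 0 < c
    · rw [pvNu_toMu grid h w _ _ (by omega) (by omega) (by omega) (by omega), if_pos h0]
      have e1 : ((r' : Int)).toNat = r' := by omega
      have e2 : ((c : Int) + -1).toNat = c - 1 := by omega
      rw [e1, e2]
    · rw [pvNu_zero grid h w _ _ (by omega), if_neg h0]
  have t2 : pvNu grid h w (r' : Int) ((c : Int) + 0) = pvMu grid r' c := by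
    rw [pvNu_toMu grid h w _ _ (by omega) (by omega) (by omega) (by omega)]
    have e1 : ((r' : Int)).toNat = r' := by omega
    have e2 : ((c : Int) + 0).toNat = c := by omega
    rw [e1, e2]
  have t3 : pvNu grid h w (r' : Int) ((c : Int) + 1) =
      (if c + 1 < w then pvMu grid r' (c + 1) else 0) := by
    by_cases h1 : c + 1 < w
    · rw [pvNu_toMu grid h w _ _ (by omega) (by omega) (by omega) (by omega), if_pos h1]
      have e1 : ((r' : Int)).toNat = r' := by omega
      have e2 : ((c : Int) + 1).toNat = c + 1 := by omega
      rw [e1, e2]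
    · rw [pvNu_zero grid h w _ _ (by omega), if_neg h1]
  rw [t1, t2, t3]

-- the pointwise identity: A's per-cell count equals B's separable box-sum expression
lemma pvMain (grid : List (List String)) (r c : Nat)
    (hr : r < grid.length) (hc : c < (grid.getD 0 []).length) :
    (if pvCell grid r c = "@" then
        pvCntA grid grid.length (grid.getD 0 []).length r c else 0) =
      (if ((pvM grid).getD r []).getD c 0 ≠ 0 then
        (if 0 < r then ((pvHs grid).getD (r - 1) []).getD c 0 else 0) +
          ((pvHs grid).getD r []).getD c 0 +
          (if r + 1 < grid.length then ((pvHs grid).getD (r + 1) []).getD c 0 else 0) - 1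
      else 0) := by
  set h := grid.length with hh
  set w := (grid.getD 0 []).length with hw
  rw [pvM_entry grid r c hr hc]
  by_cases hat : pvCell grid r c = "@"
  · have hmu1 : pvMu grid r c = 1 := by simp [pvMu, hat]
    rw [if_pos hat, if_pos (by rw [hmu1]; norm_num)]
    rw [pvCntA_eq_sum]
    have hup : (if 0 < r then ((pvHs grid).getD (r - 1) []).getD c 0 else 0) =
        pvNu grid h w ((r : Int) + -1) ((c : Int) + -1) +
        pvNu grid h w ((r : Int) + -1) ((c : Int) + 0) +
        pvNu grid h w ((r : Int) + -1) ((c : Int) + 1) := by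
      by_cases h0 : 0 < r
      · rw [if_pos h0, pvHs_entry grid (r - 1) c (by omega) hc,
          ← pvRow3 grid h w (r - 1) c (by omega) hc]
        have e : ((r - 1 : Nat) : Int) = (r : Int) + -1 := by omega
        simp only [e]
      · rw [if_neg h0,
          pvNu_zero grid h w _ _ (by omega), pvNu_zero grid h w _ _ (by omega),
          pvNu_zero grid h w _ _ (by omega)]
        norm_num
    have hmid : ((pvHs grid).getD r []).getD c 0 =
        pvNu grid h w (r : Int) ((c : Int) + -1) + pvNu grid h w (r : Int) ((c : Int) + 0) +
          pvNu grid h w (r : Int) ((c : Int) + 1) := by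
      rw [pvHs_entry grid r c hr hc, ← pvRow3 grid h w r c hr hc]
    have hdn : (if r + 1 < h then ((pvHs grid).getD (r + 1) []).getD c 0 else 0) =
        pvNu grid h w ((r : Int) + 1) ((c : Int) + -1) +
        pvNu grid h w ((r : Int) + 1) ((c : Int) + 0) +
        pvNu grid h w ((r : Int) + 1) ((c : Int) + 1) := by
      by_cases h1 : r + 1 < h
      · rw [if_pos h1, pvHs_entry grid (r + 1) c (by omega) hc,
          ← pvRow3 grid h w (r + 1) c (by omega) hc]
        have e : ((r + 1 : Nat) : Int) = (r : Int) + 1 := by push_cast; ring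
        simp only [e]
      · rw [if_neg h1,
          pvNu_zero grid h w _ _ (by omega), pvNu_zero grid h w _ _ (by omega),
          pvNu_zero grid h w _ _ (by omega)]
        norm_num
    have hctr : pvNu grid h w (r : Int) ((c : Int) + 0) = 1 := by
      rw [pvNu_toMu grid h w _ _ (by omega) (by omega) (by omega) (by omega)]
      have e1 : ((r : Int)).toNat = r := by omega
      have e2 : ((c : Int) + 0).toNat = c := by omega
      rw [e1, e2, hmu1]
    rw [hup, hmid, hdn, hctr]
    ring
  · rw [if_neg hat, if_neg (by simp [pvMu, hat])]

lemma pv_getElem2 {α : Type} (l : List (List α)) (r c : Nat) (d : α)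
    (h1 : r < l.length) (h2 : c < l[r].length) :
    l[r][c] = (l.getD r []).getD c d := by
  have e1 : l.getD r [] = l[r] := (pv_get_eq_getD l r [] h1).symm
  rw [e1]
  exact pv_get_eq_getD _ c d h2

-- full equality of the two ports
lemma pvAB (grid : List (List String)) :
    compute_initial_counts grid = compute_initial_counts_alt grid := by
  rw [pvAlt_eq]
  have hAlen : (compute_initial_counts grid).length = grid.length := pvA_length grid
  apply List.ext_getElem
  · simp [hAlen]
  · intro r h1 h2
    have hr : r < grid.length := by rw [hAlen] at h1; exact h1
    have hrowlen : ((compute_initial_counts grid).getD r []).length =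
        (grid.getD 0 []).length := pvA_row_len grid r hr
    rw [List.getElem_map, List.getElem_range]
    apply List.ext_getElem
    · rw [pv_get_eq_getD _ r [] h1, hrowlen]
      simp
    · intro c hc1 hc2
      have hc : c < (grid.getD 0 []).length := by
        rw [pv_get_eq_getD _ r [] h1, hrowlen] at hc1; exact hc1
      have lhs : (compute_initial_counts grid)[r][c] =
          ((compute_initial_counts grid).getD r []).getD c 0 :=
        pv_getElem2 _ r c 0 h1 hc1
      rw [lhs, pvA_entry grid r c hr hc, List.getElem_map, List.getElem_range]
      exact pvMain grid r c hr hc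

-- ===== VERDICT (by name: the statement is the Claim_ definition above) =====
theorem compute_initial_counts_spec : Claim_equal_compute_initial_counts := by
  intro grid _ _
  unfold Spec_compute_initial_counts
  exact pvAB grid
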